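-- pv_equiv track=rewrite | github.com/numjax/pytestproject | vari16.py | min_fee
-- ===== SOURCE A (Python) =====
-- def min_fee(pages_to_print):
--     # 코드를 작성하세요.
--     pages_to_print.sort()
--
--     fee = 0
--     acc = 0
--
--     for i in pages_to_print:
--         fee = fee + i
--         acc = acc + fee
--
--     return acc
-- ===== SOURCE B (Python) =====
-- def min_fee(pages_to_print):
--     pages_to_print.sort()
--     n = len(pages_to_print)
--     return sum((n - i) * v for i, v in enumerate(pages_to_print))
-- ===== Notes on version B (the rewrite author's own statement) =====
-- stated objective: alternative
-- what changed: Replaces the running prefix-sum accumulator pair with a direct rank-weighted sum: after sorting, each element at index i contributes (n - i) times, computed in one enumerate-based weighted sum.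
import Mathlib
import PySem

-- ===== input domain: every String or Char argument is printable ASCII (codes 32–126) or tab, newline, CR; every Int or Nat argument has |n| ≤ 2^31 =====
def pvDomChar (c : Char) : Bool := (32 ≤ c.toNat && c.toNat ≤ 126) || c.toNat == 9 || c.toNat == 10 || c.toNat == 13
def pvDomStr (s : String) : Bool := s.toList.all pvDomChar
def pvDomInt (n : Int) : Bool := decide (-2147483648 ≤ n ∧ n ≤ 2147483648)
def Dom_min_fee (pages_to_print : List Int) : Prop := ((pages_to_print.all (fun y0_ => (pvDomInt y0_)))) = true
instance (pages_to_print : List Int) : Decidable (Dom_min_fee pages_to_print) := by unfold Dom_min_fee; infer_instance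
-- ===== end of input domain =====

-- B replaces A's running prefix-sum accumulator with a rank-weighted sum over the sorted
-- list (alternative decomposition, same cost). Both versions sort the argument in place in
-- Python; the equivalence proved here is about the return value (the mutation is identical).

-- ===== PORT A =====
-- pages_to_print.sort(); fee = acc = 0; for i: fee += i; acc += fee; return acc
def min_fee (pages_to_print : List Int) : Int :=
  let sorted := PySem.List.sorted pages_to_print id false
  let r := sorted.foldl (fun (s : Int × Int) i => (s.1 + i, s.2 + (s.1 + i))) (0, 0)
  r.2

-- ===== PORT B =====
-- pages_to_print.sort(); n = len(...); return sum((n - i) * v for i, v in enumerate(...))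
def min_fee_alt (pages_to_print : List Int) : Int :=
  let sorted := PySem.List.sorted pages_to_print id false
  let n : Int := (sorted.length : Int)
  (PySem.List.enumerate sorted 0).foldl (fun acc p => acc + (n - p.1) * p.2) 0

-- ===== PRECONDITION & SPEC =====
def Spec_min_fee (pages_to_print : List Int) (out : Int) : Prop := out = min_fee_alt pages_to_print
instance (pages_to_print : List Int) (out : Int) : Decidable (Spec_min_fee pages_to_print out) := by unfold Spec_min_fee; infer_instance

-- ===== CLAIM (what is proved, stated in full; the proofs are below) =====
def Claim_equal_min_fee : Prop := ∀ (pages_to_print : List Int), Dom_min_fee pages_to_print → Spec_min_fee pages_to_print (min_fee pages_to_print)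

-- ===== LEMMAS AND PROOFS =====

-- pull a nonzero initial accumulator out of B's weighted-sum fold
theorem wfold_init (m : Int) (l : List (Int × Int)) (c : Int) :
    l.foldl (fun acc p => acc + (m - p.1) * p.2) c
      = c + l.foldl (fun acc p => acc + (m - p.1) * p.2) 0 := by
  induction l generalizing c with
  | nil => simp
  | cons x t ih =>
    simp only [List.foldl_cons]
    rw [ih (c + (m - x.1) * x.2), ih ((0 : Int) + (m - x.1) * x.2)]
    ring

-- A's accumulator fold over any list equals the rank-weighted sum of that list
theorem fold_eq_wsum (l : List Int) (k f a m : Int) (hm : m = k + l.length) :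
    (l.foldl (fun (s : Int × Int) i => (s.1 + i, s.2 + (s.1 + i))) (f, a)).2
      = a + l.length * f
        + (PySem.List.enumerate l k).foldl (fun acc p => acc + (m - p.1) * p.2) 0 := by
  induction l generalizing k f a with
  | nil => simp
  | cons x t ih =>
    simp only [List.foldl_cons, PySem.List.enumerate_cons, List.length_cons]
    rw [ih (k + 1) (f + x) (a + (f + x)) (by simp only [List.length_cons] at hm; push_cast at hm ⊢; omega)]
    rw [wfold_init m (PySem.List.enumerate t (k + 1)) ((0 : Int) + (m - k) * x)]
    have hmk : m - k = (t.length : Int) + 1 := by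
      simp only [List.length_cons] at hm; push_cast at hm ⊢; omega
    push_cast
    linear_combination (-x) * hmk

-- ===== VERDICT (by name: the statement is the Claim_ definition above) =====
theorem min_fee_spec : Claim_equal_min_fee := by
  intro l _
  show min_fee l = min_fee_alt l
  unfold min_fee min_fee_alt
  simpa using fold_eq_wsum (PySem.List.sorted l id false) 0 0 0 _ (by simp)
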